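-- pv_equiv track=rewrite | github.com/umarmomen/codingProjects | bioProjects/dnaalgs1.py | firstSeqAA
-- ===== SOURCE A (Python) =====
-- def firstSeqAA(seq):
--     i = 0
--     while i < len(seq):
--         if seq[i:i+4] == "STOP":
--             return seq[:(i+4)]
--         else:
--             i+=4
--     return seq
-- ===== SOURCE B (Python) =====
-- def firstSeqAA(seq):
--     cursor = 0
--     while True:
--         pos = seq.find("STOP", cursor)
--         if pos == -1:
--             return seq
--         if pos % 4 == 0:
--             return seq[:pos + 4]
--         cursor = pos + 1
-- ===== Notes on version B (the rewrite author's own statement) =====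
-- stated objective: faster
-- what changed: Replaces the step-by-4 slice-comparison walk with repeated str.find(codon, cursor) calls that jump directly to each candidate occurrence and keep the first 4-aligned one.
import Mathlib
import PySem

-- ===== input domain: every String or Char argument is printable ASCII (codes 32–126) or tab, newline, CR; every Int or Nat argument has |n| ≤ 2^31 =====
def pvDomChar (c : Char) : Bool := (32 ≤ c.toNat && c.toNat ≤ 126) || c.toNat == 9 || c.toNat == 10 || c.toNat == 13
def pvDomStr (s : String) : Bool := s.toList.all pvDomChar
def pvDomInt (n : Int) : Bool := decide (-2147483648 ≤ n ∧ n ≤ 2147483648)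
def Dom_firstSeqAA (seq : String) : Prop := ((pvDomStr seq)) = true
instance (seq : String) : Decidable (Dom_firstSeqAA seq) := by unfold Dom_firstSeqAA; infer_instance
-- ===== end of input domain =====

-- B replaces A's step-by-4 slice-comparison walk with repeated seq.find("STOP", cursor)
-- jumps, keeping the first 4-aligned occurrence (same return value, proved below).

-- the codon both programs search for ("STOP" as a character list)
def pvStop : List Char := ['S', 'T', 'O', 'P']

-- fact the port of B needs for termination: find(sub, k) ≠ -1 forces k ≤ len(s)
theorem pvFindFrom_le (s sub : List Char) (k : Nat)
    (h : PySem.Chars.findFrom s sub (k : Int) none ≠ -1) : k ≤ s.length := by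
  by_contra hk
  apply h
  simp only [PySem.Chars.findFrom]
  have h1 : ¬ ((k : Int) < 0) := by omega
  have h2 : ((s.length : Int)) < (k : Int) := by omega
  simp [h1, h2]

-- ===== PORT A =====
-- A's loop: i starts at 0, steps by 4; test seq[i:i+4] == "STOP", return seq[:i+4] on hit
def pvALoop (s : List Char) (i : Nat) : List Char :=
  if i < s.length then
    if PySem.List.slice s (some (i : Int)) (some ((i : Int) + 4)) = pvStop then
      PySem.List.slice s none (some ((i : Int) + 4))
    else pvALoop s (i + 4)
  else s
termination_by s.length - i

def firstSeqAA (seq : String) : String := String.ofList (pvALoop seq.toList 0)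

-- ===== PORT B =====
-- B's loop: pos = seq.find("STOP", cursor); -1 → seq; aligned → seq[:pos+4]; else cursor = pos+1
def pvBLoop (s : List Char) (cursor : Nat) : List Char :=
  let pos := PySem.Chars.findFrom s pvStop (cursor : Int) none
  if h : pos = -1 then s
  else if PySem.Int.mod pos 4 = 0 then PySem.List.slice s none (some (pos + 4))
  else pvBLoop s (pos.toNat + 1)
termination_by s.length + 1 - cursor
decreasing_by
  have hle := pvFindFrom_le s pvStop cursor h
  have hge := (PySem.Chars.findFrom_natCast_spec s pvStop cursor hle h).1
  omega

def firstSeqAA_alt (seq : String) : String := String.ofList (pvBLoop seq.toList 0)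

-- ===== PRECONDITION & SPEC =====
def Spec_firstSeqAA (seq : String) (out : String) : Prop := out = firstSeqAA_alt seq
instance (seq : String) (out : String) : Decidable (Spec_firstSeqAA seq out) := by unfold Spec_firstSeqAA; infer_instance

-- ===== CLAIM (what is proved, stated in full; the proofs are below) =====
def Claim_equal_firstSeqAA : Prop := ∀ (seq : String), Dom_firstSeqAA seq → Spec_firstSeqAA seq (firstSeqAA seq)

-- ===== LEMMAS AND PROOFS =====

-- seq[i:i+4] == "STOP" is exactly "pvStop is a prefix of s.drop i"
theorem pvSliceTest (s : List Char) (i : Nat) :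
    (PySem.List.slice s (some (i : Int)) (some ((i : Int) + 4)) = pvStop) ↔ pvStop <+: s.drop i := by
  have h4 : ((i : Int) + 4) = ((i + 4 : Nat) : Int) := by push_cast; ring
  rw [h4, PySem.List.slice_natCast]
  have : i + 4 - i = 4 := by omega
  rw [this]
  rw [List.prefix_iff_eq_take (l₁ := pvStop)]
  constructor <;> intro h <;> simpa using h.symm

-- a "STOP" occurrence at j fits inside the string
theorem pvMatch_len (s : List Char) (j : Nat) (h : pvStop <+: s.drop j) : j + 4 ≤ s.length := by
  have h1 := h.length_le
  have h2 : s.drop j ≠ [] := by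
    intro he; rw [he] at h; simp [pvStop] at h
  simp [pvStop] at h1
  have : j < s.length := by
    by_contra hj; exact h2 (List.drop_eq_nil_of_le (by omega))
  omega

-- a match at m ≥ c is visible as an infix of s.drop c
theorem pvMatch_infix (s : List Char) (c m : Nat) (hcm : c ≤ m) (h : pvStop <+: s.drop m) :
    pvStop <:+: s.drop c := by
  have hdd : s.drop m = (s.drop c).drop (m - c) := by
    rw [List.drop_drop]; congr 1; omega
  rw [hdd] at h
  exact h.isInfix.trans (List.drop_suffix _ _).isInfix

-- A with no aligned match anywhere returns s
theorem pvALoop_none (s : List Char)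
    (h : ∀ j, j % 4 = 0 → ¬ pvStop <+: s.drop j) :
    ∀ n i, s.length - i ≤ n → i % 4 = 0 → pvALoop s i = s := by
  intro n
  induction n with
  | zero =>
    intro i hn _
    rw [pvALoop]
    simp [show ¬ i < s.length by omega]
  | succ n ih =>
    intro i hn hi
    rw [pvALoop]
    split
    · rw [if_neg]
      · exact ih (i + 4) (by omega) (by omega)
      · rw [pvSliceTest]; exact h i hi
    · rfl

-- B with no aligned match anywhere returns s
theorem pvBLoop_none (s : List Char)
    (h : ∀ j, j % 4 = 0 → ¬ pvStop <+: s.drop j) :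
    ∀ n c, s.length + 1 - c ≤ n → pvBLoop s c = s := by
  intro n
  induction n with
  | zero =>
    intro c hn
    rw [pvBLoop]
    split
    · rfl
    · exfalso; have := pvFindFrom_le s pvStop c (by assumption); omega
  | succ n ih =>
    intro c hn
    rw [pvBLoop]
    split
    · rfl
    · rename_i hne
      have hle := pvFindFrom_le s pvStop c hne
      obtain ⟨hge, hpre, _⟩ := PySem.Chars.findFrom_natCast_spec s pvStop c hle hne
      set pos := PySem.Chars.findFrom s pvStop (c : Int) none with hp
      rw [if_neg, ih (pos.toNat + 1) (by omega)]
      intro hmod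
      rw [PySem.Int.mod_eq_emod_of_pos (by omega)] at hmod
      have h4 : pos.toNat % 4 = 0 := by omega
      exact h pos.toNat h4 hpre

-- A starting at an aligned i ≤ m (m = least aligned match) returns s.take (m+4)
theorem pvALoop_found (s : List Char) (m : Nat) (hm4 : m % 4 = 0) (hmP : pvStop <+: s.drop m)
    (hmin : ∀ j, j % 4 = 0 → pvStop <+: s.drop j → m ≤ j) :
    ∀ n i, m - i ≤ n → i % 4 = 0 → i ≤ m → pvALoop s i = s.take (m + 4) := by
  have hlen := pvMatch_len s m hmP
  intro n
  induction n with
  | zero =>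
    intro i hn hi him
    have : i = m := by omega
    subst this
    rw [pvALoop, if_pos (by omega), if_pos ((pvSliceTest s i).mpr hmP)]
    have h4 : ((i : Int) + 4) = ((i + 4 : Nat) : Int) := by push_cast; ring
    rw [h4, PySem.List.slice_to_natCast]
  | succ n ih =>
    intro i hn hi him
    by_cases he : i = m
    · subst he
      rw [pvALoop, if_pos (by omega), if_pos ((pvSliceTest s i).mpr hmP)]
      have h4 : ((i : Int) + 4) = ((i + 4 : Nat) : Int) := by push_cast; ring
      rw [h4, PySem.List.slice_to_natCast]
    · have hlt : i < m := by omega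
      rw [pvALoop, if_pos (by omega), if_neg]
      · exact ih (i + 4) (by omega) (by omega) (by omega)
      · rw [pvSliceTest]
        intro hpre
        have := hmin i hi hpre
        omega

-- B with cursor ≤ m (m = least aligned match) returns s.take (m+4)
theorem pvBLoop_found (s : List Char) (m : Nat) (hm4 : m % 4 = 0) (hmP : pvStop <+: s.drop m)
    (hmin : ∀ j, j % 4 = 0 → pvStop <+: s.drop j → m ≤ j) :
    ∀ n c, m + 1 - c ≤ n → c ≤ m → pvBLoop s c = s.take (m + 4) := by
  have hlen := pvMatch_len s m hmP
  intro n
  induction n with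
  | zero => intro c hn hc; omega
  | succ n ih =>
    intro c hn hc
    rw [pvBLoop]
    have hne : PySem.Chars.findFrom s pvStop (c : Int) none ≠ -1 := by
      intro heq
      exact ((PySem.Chars.findFrom_natCast_eq_neg_one_iff s pvStop c (by omega)).mp heq)
        (pvMatch_infix s c m hc hmP)
    rw [dif_neg hne]
    obtain ⟨hge, hpre, hfirst⟩ :=
      PySem.Chars.findFrom_natCast_spec s pvStop c (by omega) hne
    set pos := PySem.Chars.findFrom s pvStop (c : Int) none with hp
    have hpm : pos.toNat ≤ m := by
      by_contra hgt
      exact hfirst m hc (by omega) hmP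
    by_cases hmod : PySem.Int.mod pos 4 = 0
    · rw [if_pos hmod]
      rw [PySem.Int.mod_eq_emod_of_pos (by omega)] at hmod
      have h4 : pos.toNat % 4 = 0 := by omega
      have : pos.toNat = m := le_antisymm hpm (hmin pos.toNat h4 hpre)
      have hpos : pos = (m : Int) := by omega
      rw [hpos]
      have hc4 : ((m : Int) + 4) = ((m + 4 : Nat) : Int) := by push_cast; ring
      rw [hc4, PySem.List.slice_to_natCast]
    · rw [if_neg hmod]
      have hne4 : pos.toNat ≠ m := by
        intro he
        apply hmod
        rw [PySem.Int.mod_eq_emod_of_pos (by omega)]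
        omega
      exact ih (pos.toNat + 1) (by omega) (by omega)

-- the two loops agree from the start
theorem pvLoop_eq (s : List Char) : pvALoop s 0 = pvBLoop s 0 := by
  by_cases hex : ∃ j, j % 4 = 0 ∧ pvStop <+: s.drop j
  · obtain ⟨hm4, hmP⟩ := Nat.find_spec hex
    have hmin : ∀ j, j % 4 = 0 → pvStop <+: s.drop j → Nat.find hex ≤ j :=
      fun j h1 h2 => Nat.find_min' hex ⟨h1, h2⟩
    rw [pvALoop_found s (Nat.find hex) hm4 hmP hmin (Nat.find hex) 0 (by omega) rfl (by omega),
        pvBLoop_found s (Nat.find hex) hm4 hmP hmin (Nat.find hex + 1) 0 (by omega) (by omega)]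
  · have h : ∀ j, j % 4 = 0 → ¬ pvStop <+: s.drop j := fun j hj hp => hex ⟨j, hj, hp⟩
    rw [pvALoop_none s h (s.length) 0 (by omega) rfl,
        pvBLoop_none s h (s.length + 1) 0 (by omega)]

-- ===== VERDICT (by name: the statement is the Claim_ definition above) =====
theorem firstSeqAA_spec : Claim_equal_firstSeqAA := by
  intro seq _
  unfold Spec_firstSeqAA firstSeqAA firstSeqAA_alt
  rw [pvLoop_eq]
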